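-- pv_equiv track=rewrite | github.com/riloooo/HilbertCurveImageGenerator | hilbert-curve.py | hilbert_curve
-- ===== SOURCE A (Python) =====
-- def rotate_right(l):
--     out = l.copy()
--     out=transpose(out)
--     out=reverse_rows(out)
--     return out
--
-- def rotate_left(l):
--     out=l.copy()
--     out=reverse_rows(out)
--     out=transpose(out)
--     return out
--
-- def transpose(l):
--     out=[[None for x in range(len(l[0]))]for y in range(len(l))]
--     for y in range(len(out)):
--         for x in range(y,len(out[0])):
--             out[y][x]=l[x][y]
--             out[x][y]=l[y][x]
--     return out
--
-- def reverse_rows(l):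
--     out=[[None for x in range(len(l[0]))]for y in range(len(l))]
--     for y in range(len(l)):
--         out[y]=l[y][::-1]
--     return out
--
-- def hilbert_curve(detail_level):
--     curve=[[1,1,1],
--           [1,0,1],
--           [1,0,1]]
--     for curr_detail_level in range(1,detail_level+1):
--         right_curve=rotate_right(curve)
--         left_curve=rotate_left(curve)
--         new_curve_size = 7*2**(curr_detail_level-1)+2**(curr_detail_level-1)-1
--         new_curve=[[None for x in range(new_curve_size)] for y in range(new_curve_size)]
--         for y in range(len(curve)):
--             new_curve[y] = curve[y] +[0]+ curve[y]
--         new_curve[new_curve_size//2 - 1][new_curve_size//2]=1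
--         new_curve[new_curve_size//2]=[1]+[0 for _ in range(new_curve_size-2)]+[1]
--         for i in range(len(curve)):
--             y= i+new_curve_size//2+1
--             new_curve[y]=right_curve[i] + [0] + left_curve[i]
--         curve= new_curve.copy()
--     return curve
-- ===== SOURCE B (Python) =====
-- def hilbert_curve(detail_level):
--     if detail_level <= 0:
--         return [[1, 1, 1],
--                 [1, 0, 1],
--                 [1, 0, 1]]
--     prev = hilbert_curve(detail_level - 1)
--     m = len(prev)
--     right = [list(r) for r in zip(*prev[::-1])]          # prev rotated 90 deg clockwise
--     left = [list(r) for r in zip(*prev)][::-1]           # prev rotated 90 deg counter-clockwise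
--     top = [row + [0] + row for row in prev[:-1]] + [prev[-1] + [1] + prev[-1]]
--     mid = [1] + [0] * (2 * m - 1) + [1]
--     bottom = [r + [0] + l for r, l in zip(right, left)]
--     return top + [mid] + bottom
-- ===== Notes on version B (the rewrite author's own statement) =====
-- stated objective: simpler
-- what changed: Bottom-up loop with imperative index-by-index transpose/reverse buffers replaced by a direct recursion that assembles each level from the previous one using zip-based rotations and list concatenation (no preallocated None-grids, no in-place cell writes, no explicit size formula).
import Mathlib
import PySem

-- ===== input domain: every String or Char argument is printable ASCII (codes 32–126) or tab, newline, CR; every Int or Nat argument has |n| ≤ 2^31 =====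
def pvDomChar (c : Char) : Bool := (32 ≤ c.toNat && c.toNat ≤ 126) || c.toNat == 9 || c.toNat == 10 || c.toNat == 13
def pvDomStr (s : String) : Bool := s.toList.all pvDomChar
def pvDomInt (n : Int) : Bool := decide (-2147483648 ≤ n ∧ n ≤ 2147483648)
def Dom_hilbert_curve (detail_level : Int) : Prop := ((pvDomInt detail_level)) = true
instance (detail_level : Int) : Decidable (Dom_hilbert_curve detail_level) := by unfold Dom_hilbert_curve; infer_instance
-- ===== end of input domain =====

-- B replaces A's bottom-up loop with preallocated grids and in-place index writes by a
-- direct recursion assembling each level from the previous one with zip-based rotations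
-- and concatenation (objective: simpler).

-- ===== PORT A =====
-- l[x][y] on the matrix; in-range at every call site, so the defaults are never hit
def pvCell (l : List (List Int)) (x y : Int) : Int :=
  PySem.List.pyGetD (PySem.List.pyGetD l x []) y 0

-- out[y][x] = v
def pvSet2 (o : List (List Int)) (y x : Int) (v : Int) : List (List Int) :=
  PySem.List.pySetD o y (PySem.List.pySetD (PySem.List.pyGetD o y []) x v)

-- Python's None placeholder is ported as 0: every cell of out is overwritten before return
def pvTranspose (l : List (List Int)) : List (List Int) :=
  let out := (PySem.List.pyRange 0 (l.length : Int) 1).map (fun _ =>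
    (PySem.List.pyRange 0 ((PySem.List.pyGetD l 0 []).length : Int) 1).map (fun _ => (0:Int)))
  (PySem.List.pyRange 0 (out.length : Int) 1).foldl (fun out y =>
    (PySem.List.pyRange y ((PySem.List.pyGetD out 0 []).length : Int) 1).foldl (fun out x =>
      pvSet2 (pvSet2 out y x (pvCell l x y)) x y (pvCell l y x)) out) out

-- Python's None placeholder is ported as 0: every row of out is overwritten before return
def pvReverseRows (l : List (List Int)) : List (List Int) :=
  let out := (PySem.List.pyRange 0 (l.length : Int) 1).map (fun _ =>
    (PySem.List.pyRange 0 ((PySem.List.pyGetD l 0 []).length : Int) 1).map (fun _ => (0:Int)))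
  (PySem.List.pyRange 0 (l.length : Int) 1).foldl (fun out y =>
    PySem.List.pySetD out y
      ((PySem.List.slice? (PySem.List.pyGetD l y []) none none (-1)).getD [])) out

def pvRotateRight (l : List (List Int)) : List (List Int) := pvReverseRows (pvTranspose l)

def pvRotateLeft (l : List (List Int)) : List (List Int) := pvTranspose (pvReverseRows l)

-- the body of A's main loop; 2**(curr_detail_level-1) ported with .toNat, exact for the
-- exponents c ≥ 1 the loop supplies
def pvStep (curve : List (List Int)) (c : Int) : List (List Int) :=
  let right := pvRotateRight curve
  let left := pvRotateLeft curve
  let s : Int := 7 * 2 ^ (c - 1).toNat + 2 ^ (c - 1).toNat - 1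
  let nc0 := (PySem.List.pyRange 0 s 1).map (fun _ =>
    (PySem.List.pyRange 0 s 1).map (fun _ => (0:Int)))
  let nc1 := (PySem.List.pyRange 0 (curve.length : Int) 1).foldl (fun nc y =>
      PySem.List.pySetD nc y
        (PySem.List.pyGetD curve y [] ++ [0] ++ PySem.List.pyGetD curve y [])) nc0
  let nc2 := pvSet2 nc1 (PySem.Int.floordiv s 2 - 1) (PySem.Int.floordiv s 2) 1
  let nc3 := PySem.List.pySetD nc2 (PySem.Int.floordiv s 2)
      ([1] ++ (PySem.List.pyRange 0 (s-2) 1).map (fun _ => (0:Int)) ++ [1])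
  (PySem.List.pyRange 0 (curve.length : Int) 1).foldl (fun nc i =>
      PySem.List.pySetD nc (i + PySem.Int.floordiv s 2 + 1)
        (PySem.List.pyGetD right i [] ++ [0] ++ PySem.List.pyGetD left i [])) nc3

def hilbert_curve (detail_level : Int) : List (List Int) :=
  (PySem.List.pyRange 1 (detail_level + 1) 1).foldl pvStep
    [[1,1,1],[1,0,1],[1,0,1]]

-- ===== PORT B =====
-- zip(*l): rows are the columns of l, truncated to the shortest row
def pvZipStar (l : List (List Int)) : List (List Int) :=
  match l with
  | [] => []
  | r :: t => (List.range (t.foldl (fun m row => min m row.length) r.length)).map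
      (fun j => l.map (fun row => row.getD j 0))

def hilbert_curve_alt (detail_level : Int) : List (List Int) :=
  if detail_level ≤ 0 then [[1,1,1],[1,0,1],[1,0,1]]
  else
    let prev := hilbert_curve_alt (detail_level - 1)
    let m := prev.length
    let right := pvZipStar prev.reverse
    let left := (pvZipStar prev).reverse
    let last := PySem.List.pyGetD prev (-1) []
    let top := (prev.dropLast.map (fun row => row ++ [0] ++ row)) ++ [last ++ [1] ++ last]
    let mid := [1] ++ List.replicate (2*m - 1) (0:Int) ++ [1]
    let bottom := List.zipWith (fun r l => r ++ [0] ++ l) right left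
    top ++ [mid] ++ bottom
termination_by detail_level.toNat
decreasing_by
  rename_i h
  omega

-- ===== PRECONDITION & SPEC =====
def Spec_hilbert_curve (detail_level : Int) (out : List (List Int)) : Prop := out = hilbert_curve_alt detail_level
instance (detail_level : Int) (out : List (List Int)) : Decidable (Spec_hilbert_curve detail_level out) := by unfold Spec_hilbert_curve; infer_instance

-- ===== CLAIM (what is proved, stated in full; the proofs are below) =====
def Claim_equal_hilbert_curve : Prop := ∀ (detail_level : Int), Dom_hilbert_curve detail_level → Spec_hilbert_curve detail_level (hilbert_curve detail_level)

-- ===== LEMMAS AND PROOFS =====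

-- cell (a,b) of a matrix, Nat indices, default 0
def pvCellN (o : List (List Int)) (a b : Nat) : Int := (o.getD a []).getD b 0

-- out[y][x] = v with Nat indices
def pvSetN (o : List (List Int)) (y x : Nat) (v : Int) : List (List Int) :=
  o.set y ((o.getD y []).set x v)

-- a square matrix of side m
def pvSq (m : Nat) (M : List (List Int)) : Prop :=
  M.length = m ∧ ∀ row ∈ M, row.length = m

-- the canonical transpose of a square matrix of side m
def pvZ (m : Nat) (M : List (List Int)) : List (List Int) :=
  (List.range m).map (fun j => (List.range m).map (fun i => pvCellN M i j))

-- ---- small generic facts ----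

theorem pv_getD_set_self (l : List (List Int)) (y : Nat) (r : List Int)
    (h : y < l.length) (d : List Int) : (l.set y r).getD y d = r := by
  simp [List.getD, h]

theorem pv_getD_set_ne (l : List (List Int)) (a y : Nat) (r : List Int)
    (h : a ≠ y) (d : List Int) : (l.set y r).getD a d = l.getD a d := by
  simp [List.getD, List.getElem?_set_ne (Ne.symm h)]

theorem pv_getD_eq_getElem (l : List (List Int)) (y : Nat) (h : y < l.length)
    (d : List Int) : l.getD y d = l[y] := by
  simp [List.getD, List.getElem?_eq_getElem h]

theorem pv_getD_int_set_self (l : List Int) (y : Nat) (r : Int)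
    (h : y < l.length) (d : Int) : (l.set y r).getD y d = r := by
  simp [List.getD, h]

theorem pv_getD_int_set_ne (l : List Int) (a y : Nat) (r : Int)
    (h : a ≠ y) (d : Int) : (l.set y r).getD a d = l.getD a d := by
  simp [List.getD, List.getElem?_set_ne (Ne.symm h)]

theorem pv_getD_int_eq_getElem (l : List Int) (y : Nat) (h : y < l.length)
    (d : Int) : l.getD y d = l[y] := by
  simp [List.getD, List.getElem?_eq_getElem h]

theorem pv_range_map_getD (k : Nat) (l : List (List Int)) (hk : k ≤ l.length) :
    (List.range k).map (fun i => l.getD i []) = l.take k := by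
  apply List.ext_getElem
  · simp; omega
  · intro i h1 h2
    simp only [List.getElem_map, List.getElem_range, List.getElem_take]
    exact pv_getD_eq_getElem l i (by simp at h1; omega) []

theorem pv_map_eq_range_map {α : Type} (l : List (List Int)) (f : List Int → α) :
    l.map f = (List.range l.length).map (fun i => f (l.getD i [])) := by
  rw [show ((List.range l.length).map (fun i => f (l.getD i []))
        = ((List.range l.length).map (fun i => l.getD i [])).map f) by rw [List.map_map]; rfl,
      pv_range_map_getD _ _ le_rfl, List.take_length]

-- pyRange 0 n 1 folds are folds over List.range
theorem pv_foldl_pyRange_zero {β : Type} (n : Nat) (f : β → Int → β) (init : β) :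
    (PySem.List.pyRange 0 (n:Int) 1).foldl f init
      = (List.range n).foldl (fun (b : β) (k : Nat) => f b (k:Int)) init := by
  rw [PySem.List.pyRange_one]
  have h1 : ((n:Int) - 0).toNat = n := by omega
  rw [h1, List.foldl_map]
  simp only [Int.zero_add]
theorem pv_foldl_pyRange_off {β : Type} (j n : Nat) (f : β → Int → β) (init : β) :
    (PySem.List.pyRange (j:Int) (n:Int) 1).foldl f init
      = (List.range (n - j)).foldl (fun (b : β) (k : Nat) => f b ((j + k : Nat) : Int)) init := by
  rw [PySem.List.pyRange_one]
  have h1 : (((n:Int) - (j:Int)).toNat) = n - j := by omega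
  rw [h1, List.foldl_map]
  have hf : (fun (b : β) (k : Nat) => f b ((j:Int) + (k:Int)))
      = fun (b : β) (k : Nat) => f b (((j + k : Nat)):Int) := by
    funext b k; norm_num
  rw [hf]
theorem pv_map_pyRange_const {α : Type} (n : Nat) (c : α) :
    (PySem.List.pyRange 0 (n:Int) 1).map (fun _ => c) = List.replicate n c := by
  rw [List.map_const', PySem.List.length_pyRange_one]
  norm_num
theorem pv_foldl_set_rows (k : Nat) : ∀ (nc : List (List Int)) (f : Nat → List Int) (off : Nat),
    off + k ≤ nc.length →
    (List.range k).foldl (fun nc i => nc.set (off + i) (f i)) nc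
      = nc.take off ++ (List.range k).map f ++ nc.drop (off + k) := by
  induction k with
  | zero => intro nc f off h; simp [List.take_append_drop]
  | succ k ih =>
    intro nc f off h
    rw [List.range_succ, List.foldl_append, List.map_append, ih nc f off (by omega)]
    simp only [List.foldl_cons, List.foldl_nil, List.map_cons, List.map_nil]
    have hlen1 : (nc.take off).length = off := by rw [List.length_take]; omega
    have hlen2 : ((List.range k).map f).length = k := by simp
    have hsplit : nc.drop (off + k) = nc[off + k] :: nc.drop (off + k + 1) :=
      List.drop_eq_getElem_cons (by omega)
    rw [hsplit, List.set_append_right _ _ (by simp [hlen1, hlen2])]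
    rw [List.length_append, hlen1, hlen2, show off + k - (off + k) = 0 by omega]
    rw [List.set_cons_zero]
    simp [List.append_assoc, show off + (k+1) = off + k + 1 by omega]
theorem pvSq_row_len {m : Nat} {M : List (List Int)} (h : pvSq m M) {y : Nat}
    (hy : y < m) : (M.getD y []).length = m := by
  obtain ⟨h1, h2⟩ := h
  rw [pv_getD_eq_getElem M y (by omega) []]
  exact h2 _ (List.getElem_mem _)

theorem pvSq_setN {m : Nat} {M : List (List Int)} (h : pvSq m M) (y x : Nat)
    (hy : y < m) (v : Int) : pvSq m (pvSetN M y x v) := by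
  obtain ⟨h1, h2⟩ := h
  refine ⟨by simp [pvSetN, h1], ?_⟩
  intro row hrow
  rcases List.mem_or_eq_of_mem_set hrow with hr | hr
  · exact h2 _ hr
  · rw [hr, List.length_set]
    exact pvSq_row_len ⟨h1, h2⟩ hy

theorem pv_cell_setN {m : Nat} {M : List (List Int)} (h : pvSq m M) (y x : Nat)
    (hy : y < m) (hx : x < m) (v : Int) (a b : Nat) :
    pvCellN (pvSetN M y x v) a b
      = if a = y ∧ b = x then v else pvCellN M a b := by
  obtain ⟨h1, h2⟩ := h
  unfold pvCellN pvSetN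
  by_cases hay : a = y
  · subst hay
    rw [pv_getD_set_self _ _ _ (by omega) _]
    by_cases hbx : b = x
    · subst hbx
      rw [pv_getD_int_set_self _ _ _ (by rw [pvSq_row_len ⟨h1, h2⟩ hy]; omega) _]
      simp
    · rw [pv_getD_int_set_ne _ _ _ _ hbx _]
      simp [hbx]
  · rw [pv_getD_set_ne _ _ _ _ hay _]
    simp [hay]

theorem pvSq_Z (m : Nat) (M : List (List Int)) : pvSq m (pvZ m M) := by
  refine ⟨by simp [pvZ], ?_⟩
  intro row hrow
  simp only [pvZ, List.mem_map, List.mem_range] at hrow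
  obtain ⟨j, _, hj⟩ := hrow
  rw [← hj]; simp

theorem pv_cellN_Z {m : Nat} (M : List (List Int)) (a b : Nat) (ha : a < m) (hb : b < m) :
    pvCellN (pvZ m M) a b = pvCellN M b a := by
  show ((pvZ m M).getD a []).getD b 0 = pvCellN M b a
  have h1 : (pvZ m M).getD a [] = (List.range m).map (fun i => pvCellN M i a) := by
    unfold pvZ
    rw [pv_getD_eq_getElem _ a (by simp [ha]) []]
    simp
  rw [h1, pv_getD_int_eq_getElem _ b (by simp [hb]) 0]
  simp

-- two matrices agreeing cellwise and in shape are equal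
theorem pv_eq_of_cells {m : Nat} {X Y : List (List Int)} (hX : pvSq m X) (hY : pvSq m Y)
    (h : ∀ a b, a < m → b < m → pvCellN X a b = pvCellN Y a b) : X = Y := by
  obtain ⟨hX1, hX2⟩ := hX
  obtain ⟨hY1, hY2⟩ := hY
  apply List.ext_getElem (by omega)
  intro i h1 h2
  apply List.ext_getElem
  · rw [hX2 _ (List.getElem_mem _), hY2 _ (List.getElem_mem _)]
  · intro j hj1 hj2
    have hi : i < m := by omega
    have hjm : j < m := by
      rw [hX2 _ (List.getElem_mem _)] at hj1; exact hj1
    have := h i j hi hjm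
    unfold pvCellN at this
    rw [pv_getD_eq_getElem X i (by omega) [], pv_getD_eq_getElem Y i (by omega) []] at this
    rw [pv_getD_int_eq_getElem _ j (by omega) 0, pv_getD_int_eq_getElem _ j (by omega) 0] at this
    exact this

-- the inner loop of A's transpose, x running over j..m-1
theorem pv_transpose_inner {m : Nat} {M : List (List Int)} (hM : pvSq m M) (y : Nat) (hy : y < m) :
    ∀ (t j : Nat), j + t = m → y ≤ j → ∀ (o : List (List Int)), pvSq m o →
      pvSq m ((List.range t).foldl (fun o k =>
          pvSetN (pvSetN o y (j + k) (pvCellN M (j + k) y)) (j + k) y (pvCellN M y (j + k))) o)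
      ∧ ∀ a b, a < m → b < m →
        pvCellN ((List.range t).foldl (fun o k =>
            pvSetN (pvSetN o y (j + k) (pvCellN M (j + k) y)) (j + k) y (pvCellN M y (j + k))) o) a b
          = if a = y ∧ j ≤ b then pvCellN M b a
            else if b = y ∧ j ≤ a then pvCellN M b a
            else pvCellN o a b := by
  intro t
  induction t with
  | zero =>
    intro j hj hyj o ho
    refine ⟨by simpa using ho, ?_⟩
    intro a b ha hb
    simp only [List.range_zero, List.foldl_nil]
    split_ifs with h1 h2
    · omega
    · omega
    · rfl
  | succ t ih =>
    intro j hj hyj o ho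
    have hjm : j < m := by omega
    -- peel the first iteration (k = 0), shift the rest
    have hpeel : ∀ (o' : List (List Int)),
        (List.range (t+1)).foldl (fun o k =>
            pvSetN (pvSetN o y (j + k) (pvCellN M (j + k) y)) (j + k) y (pvCellN M y (j + k))) o'
          = (List.range t).foldl (fun o k =>
              pvSetN (pvSetN o y ((j+1) + k) (pvCellN M ((j+1) + k) y)) ((j+1) + k) y (pvCellN M y ((j+1) + k)))
              (pvSetN (pvSetN o' y j (pvCellN M j y)) j y (pvCellN M y j)) := by
      intro o'
      rw [List.range_succ_eq_map, List.foldl_cons, List.foldl_map]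
      simp only [Nat.add_zero]
      congr 1
      funext o'' k
      have : j + (k + 1) = (j + 1) + k := by omega
      rw [this]
    rw [hpeel]
    set o1 := pvSetN (pvSetN o y j (pvCellN M j y)) j y (pvCellN M y j) with ho1
    have hsq1 : pvSq m o1 := by
      apply pvSq_setN _ _ _ hjm
      exact pvSq_setN ho y j hy _
    obtain ⟨hsqr, hcells⟩ := ih (j+1) (by omega) (by omega) o1 hsq1
    refine ⟨hsqr, ?_⟩
    intro a b ha hb
    rw [hcells a b ha hb]
    have hc1 : pvCellN o1 a b
        = if a = j ∧ b = y then pvCellN M y j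
          else if a = y ∧ b = j then pvCellN M j y
          else pvCellN o a b := by
      rw [ho1, pv_cell_setN (pvSq_setN ho y j hy _) j y hjm hy _ a b,
          pv_cell_setN ho y j hy hjm _ a b]
    by_cases hay : a = y <;> by_cases hby : b = y <;>
      by_cases haj : a = j <;> by_cases hbj : b = j <;>
      simp only [hc1] <;> split_ifs <;> (try rfl) <;> (try omega) <;>
      (try (subst_vars; rfl))

-- bridges from the Int-indexed port primitives to the Nat-indexed forms
theorem pv_set2_natCast (o : List (List Int)) (y x : Nat) (v : Int) :
    pvSet2 o (y:Int) (x:Int) v = pvSetN o y x v := by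
  simp [pvSet2, pvSetN]

theorem pv_cell_natCast (l : List (List Int)) (x y : Nat) :
    pvCell l (x:Int) (y:Int) = pvCellN l x y := by
  simp [pvCell, pvCellN]

theorem pv_replicate_sq (m : Nat) : pvSq m (List.replicate m (List.replicate m (0:Int))) := by
  refine ⟨by simp, ?_⟩
  intro row hrow
  rw [List.eq_of_mem_replicate hrow]
  simp

theorem pv_cell_replicate (m a b : Nat) :
    pvCellN (List.replicate m (List.replicate m (0:Int))) a b = 0 := by
  unfold pvCellN
  have h1 : (List.replicate m (List.replicate m (0:Int))).getD a []
      = if a < m then List.replicate m 0 else [] := by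
    split_ifs with h
    · rw [pv_getD_eq_getElem _ a (by simp [h]) []]; simp
    · exact List.getD_eq_default _ _ (by simp; omega)
  rw [h1]
  split_ifs with h
  · by_cases hb : b < m
    · rw [pv_getD_int_eq_getElem _ b (by simp [hb]) 0]; simp
    · exact List.getD_eq_default _ _ (by simp; omega)
  · simp

-- one outer iteration of A's transpose (the whole inner loop at row y = k)
theorem pv_transpose_stepOB {m : Nat} {M : List (List Int)} (hM : pvSq m M) (k : Nat)
    (hk : k < m) (O : List (List Int)) (hO : pvSq m O) :
    pvSq m ((PySem.List.pyRange (k:Int) (((PySem.List.pyGetD O 0 []).length : Nat) : Int) 1).foldl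
        (fun out x => pvSet2 (pvSet2 out (k:Int) x (pvCell M x (k:Int))) x (k:Int) (pvCell M (k:Int) x)) O)
    ∧ ∀ a b, a < m → b < m →
      pvCellN ((PySem.List.pyRange (k:Int) (((PySem.List.pyGetD O 0 []).length : Nat) : Int) 1).foldl
          (fun out x => pvSet2 (pvSet2 out (k:Int) x (pvCell M x (k:Int))) x (k:Int) (pvCell M (k:Int) x)) O) a b
        = if a = k ∧ k ≤ b then pvCellN M b a
          else if b = k ∧ k ≤ a then pvCellN M b a
          else pvCellN O a b := by
  have hrow0 : (PySem.List.pyGetD O 0 []).length = m := by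
    rw [PySem.List.pyGetD_zero]
    exact pvSq_row_len hO (by omega)
  rw [hrow0, pv_foldl_pyRange_off k m]
  simp only [pv_set2_natCast, pv_cell_natCast]
  exact pv_transpose_inner hM k hk (m - k) k (by omega) le_rfl O hO

-- the outer loop of A's transpose after k iterations
theorem pv_transpose_outer {m : Nat} {M : List (List Int)} (hM : pvSq m M) :
    ∀ (k : Nat), k ≤ m →
      pvSq m ((List.range k).foldl (fun out (y : Nat) =>
          (PySem.List.pyRange (y:Int) (((PySem.List.pyGetD out 0 []).length : Nat) : Int) 1).foldl
            (fun out x => pvSet2 (pvSet2 out (y:Int) x (pvCell M x (y:Int))) x (y:Int) (pvCell M (y:Int) x)) out)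
          (List.replicate m (List.replicate m 0)))
      ∧ ∀ a b, a < m → b < m →
        pvCellN ((List.range k).foldl (fun out (y : Nat) =>
            (PySem.List.pyRange (y:Int) (((PySem.List.pyGetD out 0 []).length : Nat) : Int) 1).foldl
              (fun out x => pvSet2 (pvSet2 out (y:Int) x (pvCell M x (y:Int))) x (y:Int) (pvCell M (y:Int) x)) out)
            (List.replicate m (List.replicate m 0))) a b
          = if a < k ∨ b < k then pvCellN M b a else 0 := by
  intro k
  induction k with
  | zero =>
    intro _
    refine ⟨by simpa using pv_replicate_sq m, ?_⟩
    intro a b ha hb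
    simp [pv_cell_replicate]
  | succ k ihk =>
    intro hk1
    obtain ⟨ihsq, ihcell⟩ := ihk (by omega)
    rw [List.range_succ, List.foldl_append, List.foldl_cons, List.foldl_nil]
    obtain ⟨hsq2, hcell2⟩ := pv_transpose_stepOB hM k (by omega) _ ihsq
    refine ⟨hsq2, ?_⟩
    intro a b ha hb
    rw [hcell2 a b ha hb]
    by_cases hak : a = k <;> by_cases hbk : b = k <;>
      [skip; skip; skip; rw [ihcell a b ha hb]] <;>
      split_ifs <;> (try rfl) <;> (try omega) <;>
      (try (rw [ihcell a b ha hb]; split_ifs <;> (try rfl) <;> omega))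

-- A's transpose is the canonical transpose on square matrices
theorem pv_transpose_eq {m : Nat} {M : List (List Int)} (hM : pvSq m M) (hm : 1 ≤ m) :
    pvTranspose M = pvZ m M := by
  have hrow0M : (PySem.List.pyGetD M 0 []).length = m := by
    rw [PySem.List.pyGetD_zero]
    exact pvSq_row_len hM (by omega)
  have hlen : M.length = m := hM.1
  unfold pvTranspose
  simp only [hrow0M, hlen]
  rw [show ((PySem.List.pyRange 0 (m:Int) 1).map (fun _ => (0:Int))) = List.replicate m 0 from pv_map_pyRange_const m 0]
  rw [pv_map_pyRange_const]
  rw [show (List.replicate m (List.replicate m (0:Int))).length = m by simp]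
  rw [pv_foldl_pyRange_zero]
  obtain ⟨hsq, hcell⟩ := pv_transpose_outer hM m le_rfl
  apply pv_eq_of_cells hsq (pvSq_Z m M)
  intro a b ha hb
  rw [hcell a b ha hb, pv_cellN_Z M a b ha hb]
  simp [ha]

-- zip(*l) of a square matrix is the canonical transpose
theorem pv_foldl_min_const (m : Nat) : ∀ (t : List (List Int)), (∀ row ∈ t, row.length = m) →
    t.foldl (fun acc row => min acc row.length) m = m := by
  intro t
  induction t with
  | nil => intro _; rfl
  | cons r t ih =>
    intro h
    simp only [List.foldl_cons, h r (by simp), min_self]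
    exact ih (fun row hrow => h row (by simp [hrow]))

theorem pv_zipStar_eq {m : Nat} {M : List (List Int)} (hM : pvSq m M) (hm : 1 ≤ m) :
    pvZipStar M = pvZ m M := by
  obtain ⟨h1, h2⟩ := hM
  cases M with
  | nil => simp at h1; omega
  | cons r t =>
    show (List.range (t.foldl (fun acc row => min acc row.length) r.length)).map
        (fun j => (r :: t).map (fun row => row.getD j 0)) = pvZ m (r :: t)
    have hr : r.length = m := h2 r (by simp)
    have hmin : t.foldl (fun acc row => min acc row.length) r.length = m := by
      rw [hr]
      exact pv_foldl_min_const m t (fun row hrow => h2 row (by simp [hrow]))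
    rw [hmin]
    unfold pvZ
    apply List.map_congr_left
    intro j _
    rw [pv_map_eq_range_map (r :: t) (fun row => row.getD j 0), h1]
    rfl

-- A's reverse_rows reverses every row
theorem pv_reverseRows_eq (l : List (List Int)) :
    pvReverseRows l = l.map List.reverse := by
  unfold pvReverseRows
  rw [pv_map_pyRange_const, pv_foldl_pyRange_zero]
  simp only [PySem.List.pySetD_natCast, PySem.List.pyGetD_natCast,
    PySem.List.slice?_none_none_neg_one, Option.getD_some]
  have h := pv_foldl_set_rows l.length
      (List.replicate l.length ((PySem.List.pyRange 0 ((PySem.List.pyGetD l 0 []).length : Int) 1).map (fun _ => (0:Int))))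
      (fun y => (l.getD y []).reverse) 0 (by simp)
  simp only [Nat.zero_add] at h
  rw [h]
  rw [show l.map List.reverse = (List.range l.length).map (fun i => (l.getD i []).reverse) from
    pv_map_eq_range_map l List.reverse]
  simp

theorem pvSq_reverse {m : Nat} {M : List (List Int)} (h : pvSq m M) : pvSq m M.reverse := by
  refine ⟨by simp [h.1], ?_⟩
  intro row hrow
  exact h.2 row (List.mem_reverse.mp hrow)

theorem pvSq_map_reverse {m : Nat} {M : List (List Int)} (h : pvSq m M) :
    pvSq m (M.map List.reverse) := by
  refine ⟨by simp [h.1], ?_⟩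
  intro row hrow
  simp only [List.mem_map] at hrow
  obtain ⟨r, hr, rfl⟩ := hrow
  simp [h.2 r hr]

theorem pv_rotateRight_eq {m : Nat} {M : List (List Int)} (hM : pvSq m M) (hm : 1 ≤ m) :
    pvRotateRight M = pvZipStar M.reverse := by
  unfold pvRotateRight
  rw [pv_transpose_eq hM hm, pv_reverseRows_eq, pv_zipStar_eq (pvSq_reverse hM) hm]
  unfold pvZ
  rw [List.map_map]
  apply List.map_congr_left
  intro j hj
  apply List.ext_getElem (by simp)
  intro i h1 h2
  have hi : i < m := by simpa using h2
  simp only [Function.comp_apply, List.getElem_reverse, List.getElem_map, List.getElem_range,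
    List.length_map, List.length_range]
  unfold pvCellN
  have h3 : M.reverse.getD i [] = M.getD (m - 1 - i) [] := by
    rw [pv_getD_eq_getElem _ i (by simp [hM.1]; omega) [], List.getElem_reverse,
        pv_getD_eq_getElem M _ (by rw [hM.1]; omega) []]
    congr 1
    rw [hM.1]
  rw [h3]

theorem pv_rotateLeft_eq {m : Nat} {M : List (List Int)} (hM : pvSq m M) (hm : 1 ≤ m) :
    pvRotateLeft M = (pvZipStar M).reverse := by
  unfold pvRotateLeft
  rw [pv_reverseRows_eq, pv_transpose_eq (pvSq_map_reverse hM) hm, pv_zipStar_eq hM hm]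
  unfold pvZ
  apply List.ext_getElem (by simp)
  intro j h1 h2
  have hj : j < m := by simpa using h1
  simp only [List.getElem_reverse, List.getElem_map, List.getElem_range,
    List.length_map, List.length_range]
  apply List.map_congr_left
  intro i hi
  simp only [List.mem_range] at hi
  unfold pvCellN
  have h3 : (M.map List.reverse).getD i [] = (M.getD i []).reverse := by
    rw [pv_getD_eq_getElem _ i (by simp [hM.1]; omega) [], List.getElem_map,
        pv_getD_eq_getElem M i (by rw [hM.1]; omega) []]
  rw [h3]
  have hlr : (M.getD i []).length = m := pvSq_row_len hM hi
  rw [pv_getD_int_eq_getElem _ j (by rw [List.length_reverse, hlr]; omega) 0,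
      List.getElem_reverse,
      pv_getD_int_eq_getElem _ _ (by rw [hlr]; omega) 0]
  congr 1
  rw [hlr]

theorem pv_foldl_set_rows0 (k : Nat) (nc : List (List Int)) (f : Nat → List Int)
    (h : k ≤ nc.length) :
    (List.range k).foldl (fun nc i => nc.set i (f i)) nc
      = (List.range k).map f ++ nc.drop k := by
  have h2 := pv_foldl_set_rows k nc f 0 (by omega)
  simpa using h2

theorem pv_step_eq {m : Nat} {M : List (List Int)} (hM : pvSq m M) (hm : 1 ≤ m) (c : Int)
    (hs : (7 * 2 ^ (c - 1).toNat + 2 ^ (c - 1).toNat - 1 : Int) = 2 * (m:Int) + 1) :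
    pvStep M c
      = (M.dropLast.map (fun row => row ++ [0] ++ row)
          ++ [PySem.List.pyGetD M (-1) [] ++ [1] ++ PySem.List.pyGetD M (-1) []])
        ++ [[1] ++ List.replicate (2 * m - 1) (0:Int) ++ [1]]
        ++ List.zipWith (fun r l => r ++ [0] ++ l) (pvZipStar M.reverse) ((pvZipStar M).reverse) := by
  have hlen := hM.1
  have hfd : PySem.Int.floordiv (2 * (m:Int) + 1) 2 = (m:Int) := by
    rw [PySem.Int.floordiv_eq_ediv_of_pos (by norm_num)]
    omega
  simp only [pvStep]
  rw [pv_rotateRight_eq hM hm, pv_rotateLeft_eq hM hm, hs, hfd, hlen]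
  rw [show (2 * (m:Int) + 1) = ((2*m+1 : Nat) : Int) by push_cast; ring]
  rw [show ((2*m+1 : Nat) : Int) - 2 = ((2*m-1 : Nat) : Int) by push_cast [hm]; omega]
  rw [pv_map_pyRange_const, pv_map_pyRange_const, pv_map_pyRange_const]
  simp only [pv_foldl_pyRange_zero, PySem.List.pySetD_natCast, PySem.List.pyGetD_natCast]
  rw [pv_foldl_set_rows0 m (List.replicate (2*m+1) (List.replicate (2*m+1) (0:Int)))
        (fun k => M.getD k [] ++ [0] ++ M.getD k []) (by simp; omega)]
  rw [List.drop_replicate, show 2*m+1 - m = m+1 by omega]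
  rw [show ((m:Int) - 1) = (((m-1 : Nat)):Int) by omega, pv_set2_natCast]
  simp only [pvSetN]
  have hA1 : ((List.range m).map (fun k => M.getD k [] ++ [0] ++ M.getD k [])
        ++ List.replicate (m+1) (List.replicate (2*m+1) (0:Int))).getD (m-1) []
      = M.getD (m-1) [] ++ [0] ++ M.getD (m-1) [] := by
    rw [pv_getD_eq_getElem _ (m-1) (by simp; omega) [],
        List.getElem_append_left (by simp; omega)]
    simp
  rw [hA1]
  set r : List Int := M.getD (m-1) [] with hr
  have hrow : r.length = m := pvSq_row_len hM (by omega)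
  have hcen : (r ++ [0] ++ r).set m 1 = r ++ [1] ++ r := by
    rw [List.set_append_left _ _ (by simp [hrow])]
    congr 1
    rw [List.set_append_right _ _ (by simp [hrow]), hrow]
    simp
  rw [hcen]
  have hsplit1 : (List.range m).map (fun k => M.getD k [] ++ [0] ++ M.getD k [])
      = (List.range (m-1)).map (fun k => M.getD k [] ++ [0] ++ M.getD k [])
        ++ [r ++ [0] ++ r] := by
    conv_lhs => rw [show m = (m-1)+1 by omega]
    rw [List.range_succ, List.map_append]
    simp [hr, List.getD]
  rw [hsplit1, List.append_assoc]
  rw [List.set_append_right _ _ (by simp)]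
  simp only [List.length_map, List.length_range]
  rw [show m - 1 - (m-1) = 0 by omega, List.singleton_append, List.set_cons_zero]
  rw [List.set_append_right _ _ (by simp)]
  simp only [List.length_map, List.length_range]
  rw [show m - (m-1) = 1 by omega]
  rw [List.replicate_succ]
  simp only [List.set_cons_succ, List.set_cons_zero]
  have hidx : ∀ (b : List (List Int)) (k : Nat),
      PySem.List.pySetD b ((k:Int) + (m:Int) + 1)
          ((pvZipStar M.reverse).getD k [] ++ [0] ++ (pvZipStar M).reverse.getD k [])
        = b.set (m+1+k) ((pvZipStar M.reverse).getD k [] ++ [0] ++ (pvZipStar M).reverse.getD k []) := by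
    intro b k
    rw [show ((k:Int) + (m:Int) + 1) = (((m+1+k : Nat)):Int) by push_cast; ring]
    rw [PySem.List.pySetD_natCast]
  simp only [hidx]
  rw [pv_foldl_set_rows m
      ((List.range (m-1)).map (fun k => M.getD k [] ++ [0] ++ M.getD k []) ++
        (r ++ [1] ++ r) ::
          ([1] ++ List.replicate (2*m-1) 0 ++ [1]) :: List.replicate m (List.replicate (2*m+1) (0:Int)))
      (fun k => (pvZipStar M.reverse).getD k [] ++ [0] ++ (pvZipStar M).reverse.getD k [])
      (m+1) (by simp; omega)]
  have hP : ((List.range (m-1)).map (fun k => M.getD k [] ++ [0] ++ M.getD k []) ++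
        (r ++ [1] ++ r) :: ([1] ++ List.replicate (2*m-1) 0 ++ [1]) ::
          List.replicate m (List.replicate (2*m+1) (0:Int)))
      = ((List.range (m-1)).map (fun k => M.getD k [] ++ [0] ++ M.getD k []) ++
         [r ++ [1] ++ r, [1] ++ List.replicate (2*m-1) 0 ++ [1]])
        ++ List.replicate m (List.replicate (2*m+1) (0:Int)) := by
    simp
  rw [hP]
  have hPlen : ((List.range (m-1)).map (fun k => M.getD k [] ++ [0] ++ M.getD k []) ++
      [r ++ [1] ++ r, [1] ++ List.replicate (2*m-1) 0 ++ [1]]).length = m+1 := by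
    simp; omega
  rw [List.take_left' hPlen, List.drop_eq_nil_of_le (by simp; omega), List.append_nil]
  have hlastM : PySem.List.pyGetD M (-1) [] = r := by
    have hne : M ≠ [] := by intro h0; rw [h0] at hlen; simp at hlen; omega
    rw [PySem.List.pyGetD_neg_one (h := hne)]
    rw [hr, List.getLast_eq_getElem, pv_getD_eq_getElem M (m-1) (by omega) []]
    congr 1
    rw [hlen]
  have hdrop : M.dropLast.map (fun row => row ++ [0] ++ row)
      = (List.range (m-1)).map (fun k => M.getD k [] ++ [0] ++ M.getD k []) := by
    rw [show ((List.range (m-1)).map (fun k => M.getD k [] ++ [0] ++ M.getD k []))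
          = ((List.range (m-1)).map (fun i => M.getD i [])).map (fun row => row ++ [0] ++ row)
        by rw [List.map_map]; rfl]
    rw [pv_range_map_getD (m-1) M (by omega)]
    congr 1
    rw [List.dropLast_eq_take, hlen]
  have hzipL : (pvZipStar M.reverse).length = m := by
    rw [pv_zipStar_eq (pvSq_reverse hM) hm]; simp [pvZ]
  have hzipL2 : ((pvZipStar M).reverse).length = m := by
    rw [pv_zipStar_eq hM hm]; simp [pvZ]
  have hzip : List.zipWith (fun a b => a ++ [0] ++ b) (pvZipStar M.reverse) ((pvZipStar M).reverse)
      = (List.range m).map (fun k =>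
          (pvZipStar M.reverse).getD k [] ++ [0] ++ (pvZipStar M).reverse.getD k []) := by
    apply List.ext_getElem (by simp [hzipL, hzipL2])
    intro i h1 h2
    have hi : i < m := by simp at h2; omega
    simp only [List.getElem_zipWith, List.getElem_map, List.getElem_range]
    rw [pv_getD_eq_getElem _ i (by rw [hzipL]; omega) [],
        pv_getD_eq_getElem _ i (by rw [hzipL2]; omega) []]
  rw [hdrop, hlastM, hzip]
  simp [List.append_assoc]


-- every row of the zip of two square matrices
theorem pv_zipWith_row_len {mp : Nat} {P Q : List (List Int)} (hP : pvSq mp P) (hQ : pvSq mp Q) :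
    ∀ row ∈ List.zipWith (fun r l => r ++ [0] ++ l) P Q, row.length = 2*mp+1 := by
  intro row hrow
  rw [List.mem_iff_getElem] at hrow
  obtain ⟨i, hi, rfl⟩ := hrow
  rw [List.getElem_zipWith]
  simp only [List.length_append, List.length_cons, List.length_nil]
  have hip : i < P.length := by simp at hi; omega
  have hiq : i < Q.length := by simp at hi; omega
  have h1 := hP.2 (P[i]'hip) (List.getElem_mem hip)
  have h2 := hQ.2 (Q[i]'hiq) (List.getElem_mem hiq)
  omega

-- one assembled level is a square matrix of side 2m+1
theorem pv_assembled_sq {m : Nat} {M : List (List Int)} (hM : pvSq m M) (hm : 1 ≤ m) :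
    pvSq (2*m+1)
      ((M.dropLast.map (fun row => row ++ [0] ++ row)
          ++ [PySem.List.pyGetD M (-1) [] ++ [1] ++ PySem.List.pyGetD M (-1) []])
        ++ [[1] ++ List.replicate (2*m-1) (0:Int) ++ [1]]
        ++ List.zipWith (fun r l => r ++ [0] ++ l) (pvZipStar M.reverse) ((pvZipStar M).reverse)) := by
  have hzR := pv_zipStar_eq (pvSq_reverse hM) hm
  have hzL := pv_zipStar_eq hM hm
  have hlen := hM.1
  have hne : M ≠ [] := by intro h0; rw [h0] at hlen; simp at hlen; omega
  have hlast : PySem.List.pyGetD M (-1) [] = M.getLast hne := by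
    rw [PySem.List.pyGetD_neg_one (h := hne)]
  have hlastlen : (M.getLast hne).length = m := hM.2 _ (List.getLast_mem hne)
  have hsqR : pvSq m (pvZipStar M.reverse) := by rw [hzR]; exact pvSq_Z m M.reverse
  have hsqL : pvSq m ((pvZipStar M).reverse) := by rw [hzL]; exact pvSq_reverse (pvSq_Z m M)
  constructor
  · simp only [List.length_append, List.length_map, List.length_dropLast, List.length_cons,
      List.length_nil, List.length_zipWith, hsqR.1, hsqL.1, hlen]
    omega
  · intro row hrow
    simp only [List.mem_append] at hrow
    rcases hrow with ((hrow | hrow) | hrow) | hrow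
    · simp only [List.mem_map] at hrow
      obtain ⟨q, hq, rfl⟩ := hrow
      have hqM : q ∈ M := List.dropLast_subset _ hq
      simp only [List.length_append, List.length_cons, List.length_nil, hM.2 q hqM]
      omega
    · simp only [List.mem_singleton] at hrow
      subst hrow
      simp only [List.length_append, List.length_cons, List.length_nil, hlast, hlastlen]
      omega
    · simp only [List.mem_singleton] at hrow
      subst hrow
      simp only [List.length_append, List.length_replicate, List.length_cons, List.length_nil]
      omega
    · exact pv_zipWith_row_len hsqR hsqL row hrow

-- unfolding lemmas for both ports
theorem pv_A_base (d : Int) (hd : d ≤ 0) :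
    hilbert_curve d = [[1,1,1],[1,0,1],[1,0,1]] := by
  unfold hilbert_curve
  rw [PySem.List.pyRange_one_eq_nil (by omega : d + 1 ≤ 1)]
  rfl

theorem pv_A_succ (d : Int) (hd : 1 ≤ d) :
    hilbert_curve d = pvStep (hilbert_curve (d-1)) d := by
  unfold hilbert_curve
  rw [show d + 1 = d + 1 from rfl, PySem.List.pyRange_one_succ_right (by omega : (1:Int) ≤ d),
      List.foldl_append]
  simp only [List.foldl_cons, List.foldl_nil]
  rw [show d - 1 + 1 = d by ring]

theorem pv_alt_base (d : Int) (hd : d ≤ 0) :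
    hilbert_curve_alt d = [[1,1,1],[1,0,1],[1,0,1]] := by
  unfold hilbert_curve_alt
  rw [if_pos hd]

theorem pv_alt_succ (d : Int) (hd : 0 < d) :
    hilbert_curve_alt d
      = ((hilbert_curve_alt (d-1)).dropLast.map (fun row => row ++ [0] ++ row)
          ++ [PySem.List.pyGetD (hilbert_curve_alt (d-1)) (-1) [] ++ [1]
              ++ PySem.List.pyGetD (hilbert_curve_alt (d-1)) (-1) []])
        ++ [[1] ++ List.replicate (2 * (hilbert_curve_alt (d-1)).length - 1) (0:Int) ++ [1]]
        ++ List.zipWith (fun r l => r ++ [0] ++ l) (pvZipStar (hilbert_curve_alt (d-1)).reverse)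
            ((pvZipStar (hilbert_curve_alt (d-1))).reverse) := by
  conv_lhs => rw [hilbert_curve_alt]
  rw [if_neg (by omega : ¬ d ≤ 0)]

-- B's result is a square matrix of side 2^(n+2)-1
theorem pv_alt_sq : ∀ n : Nat, pvSq (2^(n+2)-1) (hilbert_curve_alt (n:Int)) := by
  intro n
  induction n with
  | zero =>
    rw [Nat.cast_zero, pv_alt_base 0 le_rfl]
    unfold pvSq
    exact ⟨by norm_num, by intro row h; fin_cases h <;> norm_num⟩
  | succ n ih =>
    have h1n : 0 < 2^n := pow_pos (by norm_num) n
    have h4 : 2^(n+2) = 4*2^n := by ring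
    have hm : 1 ≤ 2^(n+2)-1 := by omega
    have h1 : ((n+1:Nat):Int) - 1 = ((n:Nat):Int) := by push_cast; ring
    rw [pv_alt_succ (((n+1:Nat)):Int) (by push_cast; omega), h1, ih.1]
    have hp : (2:Nat)^(n+1+2) = 2^(n+2)*2 := by
      rw [show n+1+2 = (n+2)+1 by omega, pow_succ]
    rw [show 2^(n+1+2)-1 = 2*(2^(n+2)-1)+1 by omega]
    exact pv_assembled_sq ih hm

theorem pv_main_nat : ∀ n : Nat, hilbert_curve (n:Int) = hilbert_curve_alt (n:Int) := by
  intro n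
  induction n with
  | zero => rw [Nat.cast_zero, pv_A_base 0 le_rfl, pv_alt_base 0 le_rfl]
  | succ n ih =>
    have h1n : 0 < 2^n := pow_pos (by norm_num) n
    have h4 : 2^(n+2) = 4*2^n := by ring
    have hsq := pv_alt_sq n
    have hm : 1 ≤ 2^(n+2)-1 := by omega
    have h1 : ((n+1:Nat):Int) - 1 = ((n:Nat):Int) := by push_cast; ring
    have htn : ((((n+1:Nat)):Int) - 1).toNat = n := by omega
    have hs : (7 * 2 ^ ((((n+1:Nat)):Int) - 1).toNat + 2 ^ ((((n+1:Nat)):Int) - 1).toNat - 1 : Int)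
        = 2 * ((2^(n+2)-1 : Nat):Int) + 1 := by
      rw [htn]
      push_cast [show 1 ≤ 2^(n+2) by omega]
      have e : (2:Int)^(n+2) = 4 * 2^n := by ring
      rw [e]
      ring
    rw [pv_A_succ (((n+1:Nat)):Int) (by push_cast; omega), h1, ih,
        pv_step_eq hsq hm (((n+1:Nat)):Int) hs,
        pv_alt_succ (((n+1:Nat)):Int) (by push_cast; omega), h1, hsq.1]

theorem hilbert_curve_main : ∀ (d : Int), hilbert_curve d = hilbert_curve_alt d := by
  intro d
  by_cases hd : d ≤ 0
  · rw [pv_A_base d hd, pv_alt_base d hd]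
  · have hcast : d = ((d.toNat : Nat) : Int) := by omega
    rw [hcast]
    exact pv_main_nat d.toNat

-- ===== VERDICT (by name: the statement is the Claim_ definition above) =====
theorem hilbert_curve_spec : Claim_equal_hilbert_curve := by
  intro d _
  unfold Spec_hilbert_curve
  exact hilbert_curve_main d
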